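-- pv_equiv track=rewrite | github.com/RingoWRW/UAVD4L | sensloc/utils/preprocess/generate_render_obj_compare.py | one_compare
-- ===== SOURCE A (Python) =====
-- from collections import defaultdict
--
-- def one_compare(info_dict):
--
--     merged = defaultdict(list)
--
--     for i in info_dict.items():
--         merged[tuple(i[1])].append(i[0])
--
--     # 创建一个空的列表
--     clusters = []
--
--     # 遍历合并后的大字典 #相同的tile会在一起
--     for v, ks in merged.items():
--         # 创建一个子字典，包含所有对应的键值对
--         sub_dict = dict((k, sorted(list(v))) for k in ks)
--         # 将子字典添加到列表中
--         clusters.append(sub_dict)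
--
--     return clusters
-- ===== SOURCE B (Python) =====
-- def one_compare(info_dict):
--     # Brute-force nested scan (no grouping dict): walk the items once; each time a
--     # value not seen before appears, scan the WHOLE item list and emit the cluster
--     # of all keys carrying that value. First-appearance order is preserved.
--     items = list(info_dict.items())
--     clusters = []
--     seen = []
--     for k, v in items:
--         if v in seen:
--             continue
--         seen.append(v)
--         clusters.append({kk: sorted(vv) for kk, vv in items if vv == v})
--     return clusters
-- ===== Notes on version B (the rewrite author's own statement) =====
-- stated objective: alternative
-- what changed: Replaces A's hash-grouping (a defaultdict mapping each value-tuple to its key list, then a second loop turning each group into a sub-dict) with a dictionary-free nested scan: one walk over the items that, at each first occurrence of a value, rescans the whole item list and builds that value's cluster dict directly.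
import Mathlib
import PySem

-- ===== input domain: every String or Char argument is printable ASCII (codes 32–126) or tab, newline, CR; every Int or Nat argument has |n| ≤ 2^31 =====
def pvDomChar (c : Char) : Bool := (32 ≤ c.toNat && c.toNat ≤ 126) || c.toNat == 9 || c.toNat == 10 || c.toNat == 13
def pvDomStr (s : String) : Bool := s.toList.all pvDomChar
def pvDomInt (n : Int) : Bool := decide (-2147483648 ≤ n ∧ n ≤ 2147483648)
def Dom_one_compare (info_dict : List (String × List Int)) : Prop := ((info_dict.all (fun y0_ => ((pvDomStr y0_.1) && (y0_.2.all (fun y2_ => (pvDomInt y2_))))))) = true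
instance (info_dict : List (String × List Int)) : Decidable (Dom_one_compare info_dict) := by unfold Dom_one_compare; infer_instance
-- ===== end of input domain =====

-- B drops A's grouping dict entirely: a single walk that, at each first occurrence of a
-- value, rescans the whole item list and builds that cluster dict directly (objective: alternative).

-- ===== PORT A =====
-- sub_dict = dict((k, sorted(list(v))) for k in ks) : a dict built by inserting each pair in order
def one_compare_subDict (v : List Int) (ks : List String) : PySem.Dict String (List Int) :=
  ks.foldl (fun sd k => sd.insert k (PySem.List.sorted v (fun x => x) false)) PySem.Dict.empty

def one_compare (info_dict : List (String × List Int)) : List (List (String × List Int)) :=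
  -- merged = defaultdict(list); for i in info_dict.items(): merged[tuple(i[1])].append(i[0])
  let merged : PySem.Dict (List Int) (List String) :=
    info_dict.foldl (fun d i => d.modify i.2 [] (fun ks => ks ++ [i.1])) PySem.Dict.empty
  -- clusters = []; for v, ks in merged.items(): clusters.append(sub_dict)
  merged.items.foldl (fun clusters p => clusters ++ [(one_compare_subDict p.1 p.2).items]) []

-- ===== PORT B =====
-- {kk: sorted(vv) for kk, vv in items if vv == v} : insert each filtered pair in order
def one_compare_altSub (items : List (String × List Int)) (v : List Int) : PySem.Dict String (List Int) :=
  (items.filter (fun p => p.2 == v)).foldl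
    (fun d p => d.insert p.1 (PySem.List.sorted p.2 (fun x => x) false)) PySem.Dict.empty

def one_compare_alt (info_dict : List (String × List Int)) : List (List (String × List Int)) :=
  -- clusters = []; seen = []; for k, v in items: if v in seen: continue; seen.append(v); clusters.append(…)
  (info_dict.foldl
    (fun (st : List (List (String × List Int)) × List (List Int)) p =>
      if st.2.contains p.2 then st
      else (st.1 ++ [(one_compare_altSub info_dict p.2).items], st.2 ++ [p.2]))
    ([], [])).1

-- ===== PRECONDITION & SPEC =====
def Spec_one_compare (info_dict : List (String × List Int)) (out : List (List (String × List Int))) : Prop := out = one_compare_alt info_dict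
instance (info_dict : List (String × List Int)) (out : List (List (String × List Int))) : Decidable (Spec_one_compare info_dict out) := by unfold Spec_one_compare; infer_instance

-- ===== CLAIM (what is proved, stated in full; the proofs are below) =====
def Claim_equal_one_compare : Prop := ∀ (info_dict : List (String × List Int)), Dom_one_compare info_dict → Spec_one_compare info_dict (one_compare info_dict)

-- ===== LEMMAS AND PROOFS =====

-- the distinct values of l in first-appearance order (the shape B's `seen` takes)
def pvD (l : List (String × List Int)) : List (List Int) :=
  l.foldl (fun acc p => if acc.contains p.2 then acc else acc ++ [p.2]) []

-- the keys of l carrying value v, in order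
def pvKeys (l : List (String × List Int)) (v : List Int) : List String :=
  (l.filter (fun p => p.2 == v)).map (fun p => p.1)

theorem pvD_mem_of (l : List (String × List Int)) (acc : List (List Int)) (x : List Int)
    (h : x ∈ acc ∨ x ∈ l.map (fun p => p.2)) :
    x ∈ l.foldl (fun acc p => if acc.contains p.2 then acc else acc ++ [p.2]) acc := by
  induction l generalizing acc with
  | nil => simpa using h.resolve_right (by simp)
  | cons p t ih =>
    simp only [List.foldl_cons]
    apply ih
    simp only [List.map_cons, List.mem_cons] at h
    rcases h with h | h | h
    · left; split_ifs <;> simp [h]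
    · subst h; left; split_ifs with hc
      · simpa [List.contains_iff_mem] using hc
      · simp
    · exact Or.inr h

theorem pvKeys_snoc (l : List (String × List Int)) (q : String × List Int) (v : List Int) :
    pvKeys (l ++ [q]) v = pvKeys l v ++ (if q.2 == v then [q.1] else []) := by
  simp only [pvKeys, List.filter_append]
  by_cases h : q.2 == v <;> simp [h]

theorem pvFind?_self (l : List (List Int)) (a : List Int) (h : a ∈ l) :
    List.find? (fun v => v == a) l = some a := by
  induction l with
  | nil => simp at h
  | cons x t ih =>
    by_cases hx : x = a
    · simp [hx]
    · simp [List.find?, beq_eq_false_iff_ne.mpr hx,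
        ih ((List.mem_cons.mp h).resolve_left (fun he => hx he.symm))]

-- A's grouping loop, characterised: merged = { v ↦ keys with value v  |  v ∈ pvD l }
theorem pvA_merged (l : List (String × List Int)) :
    l.foldl (fun d i => d.modify i.2 [] (fun ks => ks ++ [i.1])) PySem.Dict.empty
      = PySem.Dict.mk ((pvD l).map (fun v => (v, pvKeys l v))) := by
  induction l using List.reverseRecOn with
  | nil => rfl
  | append_singleton l q ih =>
    rw [List.foldl_append, List.foldl_cons, List.foldl_nil, ih]
    have hcont : (PySem.Dict.mk ((pvD l).map (fun v => (v, pvKeys l v)))).contains q.2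
        = (pvD l).contains q.2 := by
      simp only [PySem.Dict.contains, List.any_map, Function.comp_def]
      rw [Bool.eq_iff_iff]; simp
    have hD : pvD (l ++ [q]) = if (pvD l).contains q.2 then pvD l else pvD l ++ [q.2] := by
      simp [pvD, List.foldl_append]
    by_cases hc : (pvD l).contains q.2
    · -- q.2 already a key: modify replaces its entry in place
      have hmem : q.2 ∈ pvD l := by simpa [List.contains_iff_mem] using hc
      have hget : (PySem.Dict.mk ((pvD l).map (fun v => (v, pvKeys l v)))).getD q.2 []
          = pvKeys l q.2 := by
        simp [PySem.Dict.getD, PySem.Dict.get?, List.find?_map, Function.comp_def,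
          pvFind?_self _ _ hmem]
      rw [PySem.Dict.modify, hget, PySem.Dict.insert, hcont, if_pos hc]
      rw [hD, if_pos hc]
      simp only [PySem.Dict.mk.injEq, List.map_map, Function.comp_def]
      refine List.map_congr_left (fun v _ => ?_)
      by_cases hv : v = q.2
      · simp [hv, pvKeys_snoc]
      · simp [beq_eq_false_iff_ne.mpr hv, pvKeys_snoc,
          beq_eq_false_iff_ne.mpr (fun he => hv he.symm)]
    · -- new value: modify appends a fresh entry at the end
      have hmem : q.2 ∉ pvD l := by simpa [List.contains_iff_mem] using hc
      have hget : (PySem.Dict.mk ((pvD l).map (fun v => (v, pvKeys l v)))).getD q.2 []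
          = [] := by
        have : List.find? (fun v => v == q.2) (pvD l) = none :=
          List.find?_eq_none.mpr (fun x hx hbx => hmem ((eq_of_beq hbx) ▸ hx))
        simp [PySem.Dict.getD, PySem.Dict.get?, List.find?_map, Function.comp_def, this]
      have hvals : pvKeys l q.2 = [] := by
        have : l.filter (fun p => p.2 == q.2) = [] :=
          List.filter_eq_nil_iff.mpr (fun p hp hbp =>
            hmem ((eq_of_beq hbp) ▸ pvD_mem_of l [] p.2
              (Or.inr (List.mem_map.mpr ⟨p, hp, rfl⟩))))
        simp [pvKeys, this]
      rw [PySem.Dict.modify, hget, PySem.Dict.insert, hcont, if_neg (by simpa using hc)]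
      rw [hD, if_neg (by simpa using hc)]
      simp only [PySem.Dict.mk.injEq, List.map_append, List.map_cons,
        List.map_nil, List.nil_append]
      refine congrArg₂ (· ++ ·) ?_ ?_
      · refine List.map_congr_left (fun v hv => ?_)
        have hne : q.2 ≠ v := fun he => hmem (he ▸ hv)
        simp [pvKeys_snoc, beq_eq_false_iff_ne.mpr hne]
      · simp [pvKeys_snoc, hvals]
theorem pvB_inv (g : List Int → List (String × List Int)) (rest : List (String × List Int))
    (D : List (List Int)) :
    rest.foldl
      (fun (st : List (List (String × List Int)) × List (List Int)) p =>
        if st.2.contains p.2 then st else (st.1 ++ [g p.2], st.2 ++ [p.2]))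
      (D.map g, D)
    = ((rest.foldl (fun acc p => if acc.contains p.2 then acc else acc ++ [p.2]) D).map g,
       rest.foldl (fun acc p => if acc.contains p.2 then acc else acc ++ [p.2]) D) := by
  induction rest generalizing D with
  | nil => rfl
  | cons p t ih =>
    simp only [List.foldl_cons]
    by_cases hc : p.2 ∈ D
    · simpa [hc] using ih D
    · simpa [hc] using ih (D ++ [p.2])

theorem pvAltSub_eq (l : List (String × List Int)) (v : List Int) :
    one_compare_altSub l v = one_compare_subDict v (pvKeys l v) := by
  rw [one_compare_altSub, one_compare_subDict, pvKeys, List.foldl_map]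
  refine PySem.List.foldl_congr_mem _ _ _ _ (fun d p hp => ?_)
  have : p.2 = v := eq_of_beq (List.mem_filter.mp hp).2
  rw [this]

-- ===== VERDICT (by name: the statement is the Claim_ definition above) =====
theorem one_compare_spec : Claim_equal_one_compare := by
  intro info_dict _
  unfold Spec_one_compare one_compare one_compare_alt
  rw [pvA_merged]
  have hB := pvB_inv (fun v => (one_compare_altSub info_dict v).items) info_dict []
  simp only [List.map_nil] at hB
  rw [hB]
  show List.foldl (fun clusters p => clusters ++ [(one_compare_subDict p.1 p.2).items]) []
      ((pvD info_dict).map (fun v => (v, pvKeys info_dict v)))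
    = (pvD info_dict).map (fun v => (one_compare_altSub info_dict v).items)
  rw [PySem.List.foldl_append_singleton_eq_map, List.map_map]
  exact List.map_congr_left (fun v _ => by simp [pvAltSub_eq])
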